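-- pv_equiv track=rewrite | github.com/Toe-Knee-Y/LeetCode_HackerRank_Soln | leet_code/Amazon/new_task_1.py | solution
-- ===== SOURCE A (Python) =====
-- def solution(S):
--     # write your code in Python 3.6
--     # first we create a hashmap calculating the frequency of the letter chunks
--     if len(S) == 0:
--         return 0
--     else:
--         # we know for sure we have at least 1 char in the string
--         previous = S[0]
--         hashmap = {0: 1}
--         counter = 0
--         global_max = 1
--         for i in range(1, len(S)):
--             curr = S[i]
--             if curr == previous:
--                 hashmap[counter] += 1
--             else:
--                 counter += 1
--                 hashmap[counter] = 1
--             global_max = max(hashmap[counter], global_max)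
--             previous = curr
--
--         result = 0
--         for key in hashmap:
--             diff = global_max - hashmap[key]
--             result += diff
--
--         return result
-- ===== SOURCE B (Python) =====
-- def solution(S):
--     # Single online pass with two-pointer run scanning: when a run longer than the
--     # current maximum closes, retroactively pad all previously closed runs.
--     result = longest = closed = 0
--     i, n = 0, len(S)
--     while i < n:
--         j = i + 1
--         while j < n and S[j] == S[i]:
--             j += 1
--         r = j - i
--         if r > longest:
--             result += closed * (r - longest)
--             longest = r
--         else:
--             result += longest - r
--         closed += 1
--         i = j
--     return result
-- ===== Notes on version B (the rewrite author's own statement) =====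
-- stated objective: alternative
-- what changed: Replaces A's dict of run lengths, inline global-max tracking and second summing loop over the dict by a single two-pointer pass that never stores runs: each run's deficit is added online, and when a new longest run appears all previously closed runs are retroactively padded by closed*(r-longest).
import Mathlib
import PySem

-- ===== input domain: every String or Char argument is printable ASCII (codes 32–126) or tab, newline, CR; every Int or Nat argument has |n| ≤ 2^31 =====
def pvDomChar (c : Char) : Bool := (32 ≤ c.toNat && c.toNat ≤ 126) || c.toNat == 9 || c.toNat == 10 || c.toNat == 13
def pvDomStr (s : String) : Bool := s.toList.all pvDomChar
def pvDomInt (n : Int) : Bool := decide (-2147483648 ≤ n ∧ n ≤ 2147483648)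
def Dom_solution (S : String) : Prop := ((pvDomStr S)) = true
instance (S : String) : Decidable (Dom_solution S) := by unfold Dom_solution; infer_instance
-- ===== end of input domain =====

-- B replaces A's dict of run lengths, inline max tracking and second summing loop by one
-- two-pointer pass that adds each run's deficit online, retroactively padding earlier runs
-- when a longer run closes; objective: alternative (same cost, no dict, no second loop).

-- ===== PORT A =====
-- body of `for i in range(1, len(S))`: state = (previous, hashmap, counter, global_max);
-- iterating S[i] for i = 1..len(S)-1 is ported as a fold over the tail of S's character list.
def solutionStep (st : Char × PySem.Dict Int Int × Int × Int) (curr : Char) :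
    Char × PySem.Dict Int Int × Int × Int :=
  let previous := st.1
  let hashmap := st.2.1
  let counter := st.2.2.1
  let globalMax := st.2.2.2
  -- hashmap[counter] += 1  /  hashmap[counter] = 1  (the key is always present in the += case)
  let hashmap' := if curr == previous then hashmap.modify counter 0 (· + 1)
                  else hashmap.insert (counter + 1) 1
  let counter' := if curr == previous then counter else counter + 1
  -- global_max = max(hashmap[counter], global_max)
  let globalMax' := max (hashmap'.getD counter' 0) globalMax
  (curr, hashmap', counter', globalMax')

def solution (S : String) : Int :=
  match S.toList with
  | [] => 0
  | c :: rest =>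
    let st := rest.foldl solutionStep
      (c, (PySem.Dict.empty.insert 0 1 : PySem.Dict Int Int), 0, 1)
    let hashmap := st.2.1
    let globalMax := st.2.2.2
    -- for key in hashmap: result += global_max - hashmap[key]
    hashmap.keys.foldl (fun result key => result + (globalMax - hashmap.getD key 0)) 0

-- ===== PORT B =====
-- inner `while j < n and S[j] == S[i]: j += 1`: counts the leading chars equal to c
-- and returns the remaining suffix (j - i - 1 matches plus the rest of the string).
def innerScan (c : Char) : List Char → Nat × List Char
  | [] => (0, [])
  | d :: t => if d == c then let p := innerScan c t; (p.1 + 1, p.2) else (0, d :: t)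

lemma innerScan_snd_le (c : Char) : ∀ xs : List Char, (innerScan c xs).2.length ≤ xs.length := by
  intro xs
  induction xs with
  | nil => simp [innerScan]
  | cons d t ih =>
    by_cases h : d == c
    · simp only [innerScan, h, if_pos]
      exact Nat.le_succ_of_le ih
    · simp [innerScan, h]

-- outer `while i < n`: state = (result, longest, closed)
def solAltGo : List Char → Int × Int × Int → Int
  | [], st => st.1
  | c :: rest, st =>
    let p := innerScan c rest
    let r : Int := 1 + (p.1 : Int)
    let result := st.1
    let longest := st.2.1
    let closed := st.2.2
    let st' := if r > longest then (result + closed * (r - longest), r, closed + 1)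
               else (result + (longest - r), longest, closed + 1)
    solAltGo p.2 st'
termination_by xs => xs.length
decreasing_by
  exact Nat.lt_succ_of_le (innerScan_snd_le c rest)

def solution_alt (S : String) : Int := solAltGo S.toList (0, 0, 0)

-- ===== PRECONDITION & SPEC =====
def Spec_solution (S : String) (out : Int) : Prop := out = solution_alt S
instance (S : String) (out : Int) : Decidable (Spec_solution S out) := by unfold Spec_solution; infer_instance

-- ===== CLAIM (what is proved, stated in full; the proofs are below) =====
def Claim_equal_solution : Prop := ∀ (S : String), Dom_solution S → Spec_solution S (solution S)

-- ===== LEMMAS AND PROOFS =====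

-- run lengths of p^n ++ xs (current run of p has length n so far); proof-only abstraction
def runsB (p : Char) (n : Int) : List Char → List Int
  | [] => [n]
  | c :: rest => if c == p then runsB c (n + 1) rest else n :: runsB c 1 rest

def runsOf : List Char → List Int
  | [] => []
  | c :: rest => runsB c 1 rest

-- B's online step over one closed run
def onlineStep (st : Int × Int × Int) (r : Int) : Int × Int × Int :=
  if r > st.2.1 then (st.1 + st.2.2 * (r - st.2.1), r, st.2.2 + 1)
  else (st.1 + (st.2.1 - r), st.2.1, st.2.2 + 1)

lemma runsB_cons_self (c : Char) (n : Int) (rest : List Char) :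
    runsB c n (c :: rest) = runsB c (n + 1) rest := by simp [runsB]

lemma runsB_cons_ne (p c : Char) (h : c ≠ p) (n : Int) (rest : List Char) :
    runsB p n (c :: rest) = n :: runsB c 1 rest := by simp [runsB, h]

-- the inner scan computes the head run and the remaining suffix of runsB
lemma runsB_innerScan (xs : List Char) : ∀ (c : Char) (n : Int),
    runsB c n xs = (n + ((innerScan c xs).1 : Int)) :: runsOf (innerScan c xs).2 := by
  induction xs with
  | nil => intro c n; simp [runsB, innerScan, runsOf]
  | cons d t ih =>
    intro c n
    by_cases h : d = c
    · subst h
      rw [runsB_cons_self, ih d (n + 1)]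
      simp only [innerScan, beq_self_eq_true, if_pos]
      push_cast
      ring_nf
    · rw [runsB_cons_ne c d h n t]
      have hb : (d == c) = false := by simp [h]
      simp [innerScan, hb, runsOf]

-- B's recursion is the online fold over the run list
lemma solAltGo_eq_fold : ∀ (n : Nat) (xs : List Char), xs.length ≤ n →
    ∀ st, solAltGo xs st = ((runsOf xs).foldl onlineStep st).1 := by
  intro n
  induction n with
  | zero =>
    intro xs hx st
    have : xs = [] := List.eq_nil_of_length_eq_zero (Nat.le_zero.mp hx)
    subst this
    simp [solAltGo, runsOf]
  | succ n ih =>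
    intro xs hx st
    cases xs with
    | nil => simp [solAltGo, runsOf]
    | cons c rest =>
      rw [solAltGo]
      have hlen : (innerScan c rest).2.length ≤ n := by
        have := innerScan_snd_le c rest
        simp at hx
        omega
      rw [ih _ hlen]
      simp only [runsOf, runsB_innerScan rest c 1, List.foldl_cons]
      rfl

-- invariant of the online fold: result = longest * closed - (sum of closed runs)
lemma online_inv (rs : List Int) : ∀ (m k s : Int),
    (rs.foldl onlineStep (m * k - s, m, k)).1 =
      (rs.foldl max m) * (k + (rs.length : Int)) - (s + rs.sum) := by
  induction rs with
  | nil => intro m k s; simp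
  | cons r t ih =>
    intro m k s
    rw [List.foldl_cons, List.foldl_cons]
    by_cases h : r > m
    · simp only [onlineStep, if_pos h]
      have he : m * k - s + k * (r - m) = r * (k + 1) - (s + r) := by ring
      rw [he, ih r (k + 1) (s + r), max_eq_right (le_of_lt h)]
      simp only [List.length_cons, List.sum_cons]
      push_cast
      ring_nf
    · simp only [onlineStep, if_neg h]
      have he : m * k - s + (m - r) = m * (k + 1) - (s + r) := by ring
      rw [he, ih m (k + 1) (s + r), max_eq_left (by omega)]
      simp only [List.length_cons, List.sum_cons]
      push_cast
      ring_nf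

-- ===== A-side lemmas (dict invariant of the first loop, closed form of the second) =====

lemma getD_append_length (rs : List Int) (x : Int) :
    (rs ++ [x]).getD rs.length 0 = x := by
  simp

lemma getD_append_ne (rs : List Int) (x : Int) (i : Nat) (h : i ≠ rs.length) :
    (rs ++ [x]).getD i 0 = rs.getD i 0 := by
  rcases Nat.lt_or_ge i rs.length with hlt | hge
  · simp [List.getD, List.getElem?_append_left hlt]
  · simp [List.getD, List.getElem?_eq_none (by simp; omega : (rs ++ [x]).length ≤ i),
          List.getElem?_eq_none (by omega : rs.length ≤ i)]

lemma foldl_max_append (rs : List Int) (x : Int) :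
    (rs ++ [x]).foldl max 0 = max (rs.foldl max 0) x := by
  simp [List.foldl_append]

-- invariant of A's first loop: the dict holds exactly the run lengths seen so far,
-- keyed 0,1,…,counter in order, and global_max is their running maximum
lemma loopA_inv (xs : List Char) : ∀ (p : Char) (rs : List Int) (n g : Int)
    (d : PySem.Dict Int Int),
    d.keys = List.map (fun i : Nat => (i : Int)) (List.range (rs.length + 1)) →
    (∀ i : Nat, d.getD (i : Int) 0 = (rs ++ [n]).getD i 0) →
    g = (rs ++ [n]).foldl max 0 → 1 ≤ n →
    ((xs.foldl solutionStep (p, d, (rs.length : Int), g)).2.1.keys =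
        List.map (fun i : Nat => (i : Int)) (List.range (rs.length + (runsB p n xs).length))) ∧
    (∀ i : Nat, (xs.foldl solutionStep (p, d, (rs.length : Int), g)).2.1.getD (i : Int) 0 =
        (rs ++ runsB p n xs).getD i 0) ∧
    (xs.foldl solutionStep (p, d, (rs.length : Int), g)).2.2.2 =
        (rs ++ runsB p n xs).foldl max 0 := by
  induction xs with
  | nil =>
    intro p rs n g d Hk Hget Hg Hn
    have h1 : (runsB p n ([] : List Char)).length = 1 := rfl
    rw [List.foldl_nil, h1]
    exact ⟨Hk, Hget, Hg⟩
  | cons c xs ih =>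
    intro p rs n g d Hk Hget Hg Hn
    have hcont : d.contains ((rs.length : Nat) : Int) = true := by
      rw [PySem.Dict.contains_iff_mem_keys, Hk]
      exact List.mem_map.mpr ⟨rs.length, List.mem_range.mpr (by omega), rfl⟩
    by_cases h : c = p
    · -- same char: hashmap[counter] += 1
      subst h
      have hstep : solutionStep (c, d, (rs.length : Int), g) c =
          (c, d.modify (rs.length : Int) 0 (· + 1), (rs.length : Int),
            max ((d.modify (rs.length : Int) 0 (· + 1)).getD (rs.length : Int) 0) g) := by
        simp [solutionStep]
      have hget' : ∀ i : Nat,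
          (d.modify (rs.length : Int) 0 (· + 1)).getD (i : Int) 0 = (rs ++ [n + 1]).getD i 0 := by
        intro i
        rw [PySem.Dict.getD_modify]
        by_cases hi : i = rs.length
        · subst hi; simp [Hget rs.length]
        · have hne : (i : Int) ≠ (rs.length : Int) := by exact_mod_cast hi
          rw [if_neg hne, Hget i, getD_append_ne rs n i hi, getD_append_ne rs (n + 1) i hi]
      have hgetc : (d.modify (rs.length : Int) 0 (· + 1)).getD (rs.length : Int) 0 = n + 1 := by
        have := hget' rs.length; rwa [getD_append_length] at this
      have hk' : (d.modify (rs.length : Int) 0 (· + 1)).keys =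
          List.map (fun i : Nat => (i : Int)) (List.range (rs.length + 1)) := by
        rw [PySem.Dict.keys_modify, PySem.Dict.keys_insert_of_contains _ _ hcont, Hk]
      have hg' : max ((d.modify (rs.length : Int) 0 (· + 1)).getD (rs.length : Int) 0) g =
          (rs ++ [n + 1]).foldl max 0 := by
        rw [hgetc, Hg, foldl_max_append, foldl_max_append,
            max_comm (List.foldl max 0 rs) n, ← max_assoc,
            max_eq_left (by omega : n ≤ n + 1), max_comm]
      have hIH := ih c rs (n + 1) _ (d.modify (rs.length : Int) 0 (· + 1))
        hk' hget' hg' (by omega)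
      rw [List.foldl_cons, hstep, runsB_cons_self]
      exact hIH
    · -- new char: hashmap[counter+1] = 1
      have hnotc : d.contains ((rs.length : Int) + 1) = false := by
        rw [← Bool.not_eq_true, PySem.Dict.contains_iff_mem_keys, Hk]
        simp only [List.mem_map, List.mem_range]
        rintro ⟨j, hj, hje⟩
        omega
      have hstep : solutionStep (p, d, (rs.length : Int), g) c =
          (c, d.insert ((rs.length : Int) + 1) 1, (rs.length : Int) + 1,
            max ((d.insert ((rs.length : Int) + 1) 1).getD ((rs.length : Int) + 1) 0) g) := by
        simp [solutionStep, h]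
      have hlenc : (((rs ++ [n]).length : Nat) : Int) = (rs.length : Int) + 1 := by
        simp
      have hk' : (d.insert ((rs.length : Int) + 1) 1).keys =
          List.map (fun i : Nat => (i : Int)) (List.range ((rs ++ [n]).length + 1)) := by
        rw [PySem.Dict.keys_insert_of_not_contains d 1 hnotc, Hk]
        rw [List.length_append, List.length_cons, List.length_nil]
        conv_rhs => rw [List.range_succ]
        rw [List.map_append, List.map_singleton]
        push_cast
        simp
      have hget' : ∀ i : Nat,
          (d.insert ((rs.length : Int) + 1) 1).getD (i : Int) 0 = ((rs ++ [n]) ++ [1]).getD i 0 := by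
        intro i
        rw [PySem.Dict.getD_insert]
        by_cases hi : i = rs.length + 1
        · subst hi
          have h2 : ((rs ++ [n]) ++ [(1 : Int)]).getD (rs ++ [n]).length 0 = 1 :=
            getD_append_length (rs ++ [n]) 1
          rw [List.length_append, List.length_cons, List.length_nil] at h2
          rw [h2, if_pos (by push_cast; ring)]
        · have hne : (i : Int) ≠ (rs.length : Int) + 1 := by
            intro hc; apply hi
            have : (i : Int) = ((rs.length + 1 : Nat) : Int) := by push_cast; omega
            exact_mod_cast this
          have hne2 : i ≠ (rs ++ [n]).length := by
            intro hh; apply hi; simpa using hh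
          rw [if_neg hne, Hget i, getD_append_ne (rs ++ [n]) 1 i hne2]
      have hgetc : (d.insert ((rs.length : Int) + 1) 1).getD ((rs.length : Int) + 1) 0 = 1 :=
        PySem.Dict.getD_insert_self d ((rs.length : Int) + 1) 1 0
      have hg' : max ((d.insert ((rs.length : Int) + 1) 1).getD ((rs.length : Int) + 1) 0) g =
          ((rs ++ [n]) ++ [1]).foldl max 0 := by
        rw [hgetc, Hg, foldl_max_append (rs ++ [n]) 1, max_comm]
      have hIH := ih c (rs ++ [n]) 1 _ (d.insert ((rs.length : Int) + 1) 1)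
        hk' hget' hg' (le_refl 1)
      rw [hlenc] at hIH
      rw [List.foldl_cons, hstep, runsB_cons_ne p c h n xs]
      refine ⟨?_, ?_, ?_⟩
      · rw [hIH.1]
        congr 2
        simp only [List.length_append, List.length_cons, List.length_nil]
        omega
      · intro i
        rw [hIH.2.1 i, List.append_assoc]
        rfl
      · rw [hIH.2.2, List.append_assoc]
        rfl

lemma sum_range_sub (g : Int) (vs : List Int) :
    ((List.range vs.length).map (fun i => g - vs.getD i 0)).sum =
      g * vs.length - vs.sum := by
  induction vs using List.reverseRecOn with
  | nil => simp
  | append_singleton t a ih =>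
    rw [List.length_append, List.length_cons, List.length_nil, List.range_succ,
        List.map_append, List.sum_append, List.map_singleton, List.sum_cons, List.sum_nil,
        getD_append_length]
    have hcong : (List.range t.length).map (fun i => g - (t ++ [a]).getD i 0) =
        (List.range t.length).map (fun i => g - t.getD i 0) := by
      apply List.map_congr_left
      intro i hi
      rw [List.mem_range] at hi
      rw [getD_append_ne t a i (by omega)]
    rw [hcong, ih, List.sum_append, List.sum_cons, List.sum_nil]
    push_cast
    ring

-- A's second loop in closed form over the keys 0..m-1
lemma sumLoop (vs : List Int) (g : Int) (d : PySem.Dict Int Int)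
    (Hk : d.keys = List.map (fun i : Nat => (i : Int)) (List.range vs.length))
    (Hget : ∀ i : Nat, d.getD (i : Int) 0 = vs.getD i 0) :
    d.keys.foldl (fun result key => result + (g - d.getD key 0)) 0 =
      g * vs.length - vs.sum := by
  rw [Hk, List.foldl_map]
  have hfold : ∀ (l : List Nat) (init : Int),
      l.foldl (fun result (i : Nat) => result + (g - d.getD (i : Int) 0)) init =
        init + (l.map (fun i => g - vs.getD i 0)).sum := by
    intro l
    induction l with
    | nil => intro init; simp
    | cons x t ih =>
      intro init
      rw [List.foldl_cons, ih, Hget x, List.map_cons, List.sum_cons]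
      ring
  rw [hfold, sum_range_sub]
  ring

-- ===== VERDICT =====
theorem solution_spec : Claim_equal_solution := by
  intro S _
  unfold Spec_solution solution solution_alt
  cases hl : S.toList with
  | nil => simp [solAltGo]
  | cons c rest =>
    simp only []
    have hinv := loopA_inv rest c [] 1 1 (PySem.Dict.empty.insert 0 1)
      (by decide) (by intro i; cases i <;> (simp [PySem.Dict.getD_insert]; try omega)) (by decide) (le_refl 1)
    simp only [List.length_nil, Nat.cast_zero, List.nil_append, Nat.zero_add] at hinv
    obtain ⟨Hk, Hget, Hg⟩ := hinv
    rw [sumLoop (runsB c 1 rest) _ _ Hk Hget, Hg]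
    rw [solAltGo_eq_fold (c :: rest).length (c :: rest) (le_refl _) (0, 0, 0)]
    have hz : ((0 : Int), (0 : Int), (0 : Int)) = ((0 : Int) * 0 - 0, (0 : Int), (0 : Int)) := by
      norm_num
    rw [hz]
    simp only [runsOf]
    rw [online_inv (runsB c 1 rest) 0 0 0]
    simp
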